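-- pv_equiv track=rewrite | github.com/hksoftcorn/Algorithm | 1217_거듭제곱/sol1.py | solution
-- ===== SOURCE A (Python) =====
-- def solution(N, M):
--     if M == 1:
--         return N
--     if M % 2:
--         result = solution(N, (M-1)//2)
--         return result * result * N
--     else:
--         result = solution(N, M // 2)
--         return result * result
-- ===== SOURCE B (Python) =====
-- def solution(N, M):
--     result = 1
--     base = N
--     e = M
--     while e > 0:
--         if e % 2:
--             result *= base
--         base *= base
--         e //= 2
--     return result
-- ===== Notes on version B (the rewrite author's own statement) =====
-- stated objective: alternative
-- what changed: Replaces A's top-down recursion (combining two recursive returns) with an iterative bottom-up exponentiation-by-squaring loop over the bits of M, maintaining a running result and squared base.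
import Mathlib
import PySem

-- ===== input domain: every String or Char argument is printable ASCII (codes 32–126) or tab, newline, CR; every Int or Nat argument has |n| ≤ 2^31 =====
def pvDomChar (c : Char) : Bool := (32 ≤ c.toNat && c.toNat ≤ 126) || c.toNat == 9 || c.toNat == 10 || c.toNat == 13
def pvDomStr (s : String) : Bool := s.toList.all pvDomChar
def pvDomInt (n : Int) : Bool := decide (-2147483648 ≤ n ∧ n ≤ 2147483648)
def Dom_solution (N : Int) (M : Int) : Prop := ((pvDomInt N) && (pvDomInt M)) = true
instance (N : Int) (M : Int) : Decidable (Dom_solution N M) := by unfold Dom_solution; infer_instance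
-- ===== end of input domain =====

-- B replaces A's recursive squaring with an iterative bits-of-M loop (same cost, different decomposition).

-- ===== PORT A =====
-- A recurses on M; fuel (M.toNat + 1) only makes the recursion total in Lean:
-- it is never exhausted on the inputs Pre_solution admits (M ≥ 1).
def solutionFuel : Nat → Int → Int → Int
  | 0, _, _ => 0
  | f + 1, N, M =>
    if M = 1 then N
    else if PySem.Int.mod M 2 ≠ 0 then
      let result := solutionFuel f N (PySem.Int.floordiv (M - 1) 2)
      result * result * N
    else
      let result := solutionFuel f N (PySem.Int.floordiv M 2)
      result * result

def solution (N : Int) (M : Int) : Int := solutionFuel (M.toNat + 1) N M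

-- ===== PORT B =====
-- while e > 0: if e % 2: result *= base; base *= base; e //= 2
def powLoop (result : Int) (base : Int) (e : Int) : Int :=
  if h : e > 0 then
    powLoop (if PySem.Int.mod e 2 ≠ 0 then result * base else result)
      (base * base) (PySem.Int.floordiv e 2)
  else result
termination_by e.toNat
decreasing_by
  rw [PySem.Int.floordiv_eq_ediv_of_pos (by omega)]
  omega

def solution_alt (N : Int) (M : Int) : Int := powLoop 1 N M

-- ===== PRECONDITION & SPEC =====
-- A's recursion never terminates for M ≤ 0 (Python raises RecursionError there), so Pre_ keeps M ≥ 1.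
-- (B's loop would simply return 1 on those excluded inputs.)
def Pre_solution (N : Int) (M : Int) : Prop := 1 ≤ M
instance (N : Int) (M : Int) : Decidable (Pre_solution N M) := by unfold Pre_solution; infer_instance
def pvWitness_solution : Int × Int := (3, 5)

def Spec_solution (N : Int) (M : Int) (out : Int) : Prop := out = solution_alt N M
instance (N : Int) (M : Int) (out : Int) : Decidable (Spec_solution N M out) := by unfold Spec_solution; infer_instance

-- ===== CLAIM =====
def Claim_equal_solution : Prop := ∀ (N : Int) (M : Int), Dom_solution N M → Pre_solution N M → Spec_solution N M (solution N M)

-- ===== LEMMAS AND PROOFS =====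

-- A computes N ^ M (as a Nat exponent) whenever M ≥ 1 and the fuel exceeds M.
theorem solutionFuel_eq_pow (f : Nat) : ∀ (N M : Int), 1 ≤ M → M.toNat < f →
    solutionFuel f N M = N ^ M.toNat := by
  induction f with
  | zero => intro N M h1 h2; omega
  | succ f ih =>
    intro N M h1 h2
    rw [solutionFuel]
    by_cases hM1 : M = 1
    · simp [hM1]
    · have hM2 : 2 ≤ M := by omega
      rw [if_neg hM1]
      rw [PySem.Int.mod_eq_emod_of_pos (by omega), PySem.Int.floordiv_eq_ediv_of_pos (a := M - 1) (by omega), PySem.Int.floordiv_eq_ediv_of_pos (a := M) (by omega)]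
      by_cases hodd : M % 2 = 0
      · rw [if_neg (by simpa using hodd)]
        rw [ih N (M / 2) (by omega) (by omega)]
        show N ^ (M / 2).toNat * N ^ (M / 2).toNat = N ^ M.toNat
        rw [← pow_add]
        congr 1
        omega
      · rw [if_pos (by simpa using hodd)]
        rw [ih N ((M - 1) / 2) (by omega) (by omega)]
        show N ^ ((M - 1) / 2).toNat * N ^ ((M - 1) / 2).toNat * N = N ^ M.toNat
        rw [← pow_add, ← pow_succ]
        congr 1
        omega

-- B's loop computes result * base ^ e (as a Nat exponent); for e ≤ 0 it returns result.
theorem powLoop_eq_aux (n : Nat) : ∀ (e : Int), e.toNat ≤ n → ∀ (r b : Int), powLoop r b e = r * b ^ e.toNat := by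
  induction n with
  | zero =>
    intro e he r b
    rw [powLoop, dif_neg (by omega)]
    have : e.toNat = 0 := by omega
    simp [this]
  | succ n ih =>
    intro e he r b
    by_cases hpos : e > 0
    · rw [powLoop, dif_pos hpos]
      rw [PySem.Int.mod_eq_emod_of_pos (by omega), PySem.Int.floordiv_eq_ediv_of_pos (by omega)]
      rw [ih (e / 2) (by omega)]
      have hsplit : e.toNat = 2 * (e / 2).toNat + (e % 2).toNat := by omega
      rw [hsplit, pow_add, pow_mul]
      by_cases hodd : e % 2 = 0
      · rw [if_neg (show ¬ e % 2 ≠ 0 from by omega)]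
        have h0 : (e % 2).toNat = 0 := by omega
        rw [h0, pow_zero, mul_one, pow_two]
      · rw [if_pos (show e % 2 ≠ 0 from by omega)]
        have h1 : (e % 2).toNat = 1 := by omega
        rw [h1, pow_one, pow_two]
        ring
    · rw [powLoop, dif_neg hpos]
      have : e.toNat = 0 := by omega
      simp [this]

theorem powLoop_eq (e : Int) (r b : Int) : powLoop r b e = r * b ^ e.toNat :=
  powLoop_eq_aux e.toNat e (le_refl _) r b

-- ===== VERDICT =====
theorem solution_spec : Claim_equal_solution := by
  intro N M _ hpre
  unfold Spec_solution solution solution_alt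
  rw [solutionFuel_eq_pow _ _ _ hpre (by omega), powLoop_eq]
  ring
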